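-- pv_equiv track=rewrite | github.com/iigeshii/librarian_optimize | villager_optimizer.py | optimize_villagers
-- ===== SOURCE A (Python) =====
-- def optimize_villagers(villager_enchantments, enchantment_costs, cost_threshold):
--     sorted_villagers = sorted(villager_enchantments.items(), key=lambda x: len(x[1]), reverse=True)
--
--     selected_villagers = {}
--     optimal_set = {}
--
--     for villager, enchantments in sorted_villagers:
--         for enchantment, cost in enchantments:
--             if enchantment not in optimal_set:
--                 optimal_set[enchantment] = (villager, cost)
--                 selected_villagers[villager] = True
--             else:
--                 previous_villager, previous_cost = optimal_set[enchantment]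
--                 if cost < previous_cost:
--                     optimal_set[enchantment] = (villager, cost)
--                     selected_villagers[villager] = True
--                     selected_villagers[previous_villager] = True
--
--     return selected_villagers, optimal_set
-- ===== SOURCE B (Python) =====
-- def optimize_villagers(villager_enchantments, enchantment_costs, cost_threshold):
--     order = sorted(villager_enchantments.items(), key=lambda x: len(x[1]), reverse=True)
--
--     # index-first: enchantment -> list of (global position, villager, cost)
--     index = {}
--     pos = 0
--     for villager, enchantments in order:
--         for enchantment, cost in enchantments:
--             index.setdefault(enchantment, []).append((pos, villager, cost))
--             pos += 1
--
--     # per-enchantment prefix-minimum scan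
--     optimal_set = {}
--     win_events = []
--     for enchantment, entries in index.items():
--         best = None
--         for p, villager, cost in entries:
--             if best is None or cost < best:
--                 best = cost
--                 optimal_set[enchantment] = (villager, cost)
--                 win_events.append((p, villager))
--
--     # selected villagers in order of their first win
--     win_events.sort(key=lambda t: t[0])
--     selected_villagers = {}
--     for _, villager in win_events:
--         if villager not in selected_villagers:
--             selected_villagers[villager] = True
--     return selected_villagers, optimal_set
-- ===== Notes on version B (the rewrite author's own statement) =====
-- stated objective: alternative
-- what changed: Replaces A's single interleaved scan that mutates both result dicts per event with an index-first decomposition: group all (position, villager, cost) entries per enchantment, run an independent prefix-minimum scan per enchantment, then sort the win events by global position to rebuild the selected-villagers order.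
import Mathlib
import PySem

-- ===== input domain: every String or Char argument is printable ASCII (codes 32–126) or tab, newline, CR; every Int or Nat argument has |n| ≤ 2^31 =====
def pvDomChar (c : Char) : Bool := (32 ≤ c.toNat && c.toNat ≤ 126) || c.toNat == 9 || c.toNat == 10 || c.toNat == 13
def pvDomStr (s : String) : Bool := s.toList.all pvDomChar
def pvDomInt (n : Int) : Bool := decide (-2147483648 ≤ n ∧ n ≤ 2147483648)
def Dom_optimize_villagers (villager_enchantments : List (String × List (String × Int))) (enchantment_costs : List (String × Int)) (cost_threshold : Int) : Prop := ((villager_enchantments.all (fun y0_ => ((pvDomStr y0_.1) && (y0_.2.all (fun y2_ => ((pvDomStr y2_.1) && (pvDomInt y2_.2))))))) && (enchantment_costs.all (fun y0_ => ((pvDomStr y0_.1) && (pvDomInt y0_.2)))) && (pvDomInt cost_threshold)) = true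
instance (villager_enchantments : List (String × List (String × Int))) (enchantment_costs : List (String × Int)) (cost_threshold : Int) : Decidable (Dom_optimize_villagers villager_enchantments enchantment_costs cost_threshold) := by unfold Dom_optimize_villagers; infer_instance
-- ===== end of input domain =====

-- B replaces A's single interleaved scan with an index-first decomposition (group entries
-- per enchantment, independent prefix-minimum scan per group, then sort the win events by
-- global position to rebuild the selection order); alternative structure, no speed claim.

-- ===== PORT A =====
def optimize_villagers (villager_enchantments : List (String × List (String × Int))) (enchantment_costs : List (String × Int)) (cost_threshold : Int) : (List (String × Bool)) × (List (String × String × Int)) :=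
  let sorted_villagers := PySem.List.sorted (PySem.Dict.ofList villager_enchantments).items (fun x => (x.2.length : Int)) true
  let st := sorted_villagers.foldl (fun st p =>
      p.2.foldl (fun st2 q =>
        match st2.2.get? q.1 with
        | none => (st2.1.insert p.1 true, st2.2.insert q.1 (p.1, q.2))
        | some prev =>
          if q.2 < prev.2 then
            ((st2.1.insert p.1 true).insert prev.1 true, st2.2.insert q.1 (p.1, q.2))
          else st2) st)
    ((PySem.Dict.empty : PySem.Dict String Bool), (PySem.Dict.empty : PySem.Dict String (String × Int)))
  (st.1.items, st.2.items)

-- ===== PORT B =====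
def optimize_villagers_alt (villager_enchantments : List (String × List (String × Int))) (enchantment_costs : List (String × Int)) (cost_threshold : Int) : (List (String × Bool)) × (List (String × String × Int)) :=
  let order := PySem.List.sorted (PySem.Dict.ofList villager_enchantments).items (fun x => (x.2.length : Int)) true
  -- index-first: enchantment -> list of (global position, villager, cost)
  let ix := order.foldl (fun (st : PySem.Dict String (List (Int × String × Int)) × Int) p =>
      p.2.foldl (fun st2 q =>
        (st2.1.modify q.1 [] (fun l => l ++ [(st2.2, p.1, q.2)]), st2.2 + 1)) st)
    (PySem.Dict.empty, (0 : Int))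
  -- per-enchantment prefix-minimum scan
  let st := ix.1.items.foldl (fun (st : PySem.Dict String (String × Int) × List (Int × String)) gi =>
      let r := gi.2.foldl (fun (st2 : PySem.Dict String (String × Int) × List (Int × String) × Option Int) t =>
          match st2.2.2 with
          | none => (st2.1.insert gi.1 (t.2.1, t.2.2), st2.2.1 ++ [(t.1, t.2.1)], some t.2.2)
          | some b =>
            if t.2.2 < b then (st2.1.insert gi.1 (t.2.1, t.2.2), st2.2.1 ++ [(t.1, t.2.1)], some t.2.2)
            else st2) (st.1, st.2, none)
      (r.1, r.2.1))
    ((PySem.Dict.empty : PySem.Dict String (String × Int)), ([] : List (Int × String)))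
  -- selected villagers in order of their first win
  let win_events := PySem.List.sorted st.2 (fun t => t.1)
  let sel := win_events.foldl (fun (d : PySem.Dict String Bool) t =>
      if d.contains t.2 then d else d.insert t.2 true) PySem.Dict.empty
  (sel.items, st.1.items)

-- ===== PRECONDITION & SPEC =====
def Spec_optimize_villagers (villager_enchantments : List (String × List (String × Int))) (enchantment_costs : List (String × Int)) (cost_threshold : Int) (out : (List (String × Bool)) × (List (String × String × Int))) : Prop := out = optimize_villagers_alt villager_enchantments enchantment_costs cost_threshold
instance (villager_enchantments : List (String × List (String × Int))) (enchantment_costs : List (String × Int)) (cost_threshold : Int) (out : (List (String × Bool)) × (List (String × String × Int))) : Decidable (Spec_optimize_villagers villager_enchantments enchantment_costs cost_threshold out) := by unfold Spec_optimize_villagers; infer_instance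

-- ===== CLAIM (what is proved, stated in full; the proofs are below) =====
def Claim_equal_optimize_villagers : Prop := ∀ (villager_enchantments : List (String × List (String × Int))) (enchantment_costs : List (String × Int)) (cost_threshold : Int), Dom_optimize_villagers villager_enchantments enchantment_costs cost_threshold → Spec_optimize_villagers villager_enchantments enchantment_costs cost_threshold (optimize_villagers villager_enchantments enchantment_costs cost_threshold)

-- ===== LEMMAS AND PROOFS =====

-- (villager, enchantment, cost) triples; pvEn adds the global position
abbrev pvEv : Type := String × String × Int
abbrev pvEn : Type := Int × pvEv
def pvFlat (vs : List (String × List (String × Int))) : List pvEv :=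
  vs.flatMap (fun p => p.2.map (fun q => (p.1, q.1, q.2)))
def pvEnum : Int → List pvEv → List pvEn
  | _, [] => []
  | pos, t :: ts => (pos, t) :: pvEnum (pos + 1) ts
def pvGW (b : Option Int) : List (Int × String × Int) → List (Int × String × Int)
  | [] => []
  | x :: t =>
    match b with
    | none => x :: pvGW (some x.2.2) t
    | some bb => if x.2.2 < bb then x :: pvGW (some x.2.2) t else pvGW b t

theorem pv_nested_eq_flat {σ : Type} (F : σ → pvEv → σ) (vs : List (String × List (String × Int))) (init : σ) :
    vs.foldl (fun st p => p.2.foldl (fun st2 q => F st2 (p.1, q.1, q.2)) st) init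
      = (pvFlat vs).foldl F init := by
  induction vs generalizing init with
  | nil => rfl
  | cons p t ih =>
    simp only [List.foldl_cons, pvFlat, List.flatMap_cons, List.foldl_append, List.foldl_map]
    exact ih _

theorem pv_enum_foldl {σ : Type} (F : σ → pvEv → σ) : ∀ (l : List pvEv) (pos : Int) (init : σ),
    (pvEnum pos l).foldl (fun st x => F st x.2) init = l.foldl F init := by
  intro l
  induction l with
  | nil => intro pos init; rfl
  | cons x t ih => intro pos init; simp only [pvEnum, List.foldl_cons]; exact ih _ _

theorem pv_insert_true_self (d : PySem.Dict String Bool) (k : String)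
    (h : d.get? k = some true) (hn : d.keys.Nodup) : d.insert k true = d := by
  apply PySem.Dict.ext
  have hc : d.contains k = true := by rw [PySem.Dict.contains_eq_isSome_get?, h]; rfl
  rw [PySem.Dict.items_insert, if_pos hc]
  have hcong : ∀ p ∈ d.items, (if (p.1 == k) = true then ((k, true) : String × Bool) else p) = p := by
    intro p hp
    obtain ⟨p1, p2⟩ := p
    by_cases hpk : p1 = k
    · have hg : d.get? p1 = some p2 := PySem.Dict.get?_of_mem_items d hp hn
      rw [hpk] at hg; rw [hg] at h
      have : p2 = true := by injection h
      simp [hpk, ← this]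
    · simp [hpk]
  rw [List.map_congr_left hcong]
  simp

theorem pv_enum_pairwise : ∀ (l : List pvEv) (pos : Int), (pvEnum pos l).Pairwise (fun a b => a.1 < b.1) := by
  intro l
  induction l with
  | nil => intro pos; exact List.Pairwise.nil
  | cons x t ih =>
    intro pos
    refine List.Pairwise.cons ?_ (ih (pos + 1))
    intro y hy
    have hmono : ∀ (t : List pvEv) (p : Int) (y : pvEn), y ∈ pvEnum p t → p ≤ y.1 := by
      intro t
      induction t with
      | nil => intro p y hy; cases hy
      | cons z zs ihz =>
        intro p y hy
        simp only [pvEnum, List.mem_cons] at hy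
        rcases hy with rfl | hy
        · omega
        · have := ihz (p + 1) y hy; omega
    have := hmono t (pos + 1) y hy
    simp; omega

theorem pv_const_key {ν : Type} (k : String) (F : (Int × String × Int) → ν) (d0 : ν) :
    ∀ (l : List (Int × String × Int)) (o : PySem.Dict String ν), l ≠ [] →
    l.foldl (fun o x => o.insert k (F x)) o = o.insert k ((l.map F).getLastD d0) := by
  intro l
  induction l with
  | nil => intro o h; exact absurd rfl h
  | cons x t ih =>
    intro o _
    cases t with
    | nil => rfl
    | cons y ys =>
      rw [List.foldl_cons, ih (o.insert k (F x)) (by simp), PySem.Dict.insert_insert_self]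
      simp only [List.map_cons, List.getLastD_cons]

theorem pv_gfold (k : String) : ∀ (l : List (Int × String × Int)) (opt : PySem.Dict String (String × Int))
    (ws : List (Int × String)) (b : Option Int),
    l.foldl (fun st2 t =>
        match st2.2.2 with
        | none => (st2.1.insert k (t.2.1, t.2.2), st2.2.1 ++ [(t.1, t.2.1)], some t.2.2)
        | some bb =>
          if t.2.2 < bb then (st2.1.insert k (t.2.1, t.2.2), st2.2.1 ++ [(t.1, t.2.1)], some t.2.2)
          else st2) (opt, ws, b)
      = ((pvGW b l).foldl (fun o x => o.insert k (x.2.1, x.2.2)) opt,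
         ws ++ (pvGW b l).map (fun x => (x.1, x.2.1)),
         (pvGW b l).foldl (fun _ x => some x.2.2) b) := by
  intro l
  induction l with
  | nil => intro opt ws b; simp [pvGW]
  | cons x t ih =>
    intro opt ws b
    cases b with
    | none =>
      simp only [List.foldl_cons, pvGW]
      rw [ih]
      simp
    | some bb =>
      by_cases hlt : x.2.2 < bb
      · simp only [List.foldl_cons, pvGW, if_pos hlt]
        rw [ih]
        simp
      · simp only [List.foldl_cons, pvGW, if_neg hlt]
        rw [ih]

def pvWins (best : String → Option Int) : List pvEn → List pvEn
  | [] => []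
  | x :: t =>
    match best x.2.2.1 with
    | none => x :: pvWins (fun e => if e = x.2.2.1 then some x.2.2.2 else best e) t
    | some b =>
      if x.2.2.2 < b then x :: pvWins (fun e => if e = x.2.2.1 then some x.2.2.2 else best e) t
      else pvWins best t

theorem pv_wins_sublist (best : String → Option Int) (l : List pvEn) : (pvWins best l).Sublist l := by
  induction l generalizing best with
  | nil => simp [pvWins]
  | cons x t ih =>
    simp only [pvWins]
    rcases h : best x.2.2.1 with _ | b
    · exact List.Sublist.cons₂ x (ih _)
    · by_cases hlt : x.2.2.2 < b
      · simp only [if_pos hlt]; exact List.Sublist.cons₂ x (ih _)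
      · simp only [if_neg hlt]; exact List.Sublist.cons x (ih _)

theorem pv_ix_bridge : ∀ (l : List pvEv) (d : PySem.Dict String (List (Int × String × Int))) (pos : Int),
    l.foldl (fun st x => (st.1.modify x.2.1 [] (fun u => u ++ [(st.2, x.1, x.2.2)]), st.2 + 1)) (d, pos)
      = ((pvEnum pos l).foldl (fun d y => d.modify y.2.2.1 [] (fun u => u ++ [(y.1, y.2.1, y.2.2.2)])) d,
         pos + l.length) := by
  intro l
  induction l with
  | nil => intro d pos; simp [pvEnum]
  | cons x t ih =>
    intro d pos
    simp only [List.foldl_cons, pvEnum]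
    rw [ih]
    congr 1
    simp only [List.length_cons]
    push_cast
    omega

theorem pv_wins_filter (k : String) : ∀ (l : List pvEn) (best best' : String → Option Int),
    best k = best' k →
    (pvWins best l).filter (fun y => y.2.2.1 == k) = pvWins best' (l.filter (fun y => y.2.2.1 == k)) := by
  intro l
  induction l with
  | nil => intro best best' h; rfl
  | cons x t ih =>
    intro best best' h
    by_cases hk : x.2.2.1 = k
    · subst hk
      rcases hb : best x.2.2.1 with _ | b
      · have hb' : best' x.2.2.1 = none := by rw [← h, hb]
        simp only [pvWins, hb, hb', List.filter_cons, beq_self_eq_true, reduceIte]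
        congr 1
        exact ih _ _ (by simp)
      · have hb' : best' x.2.2.1 = some b := by rw [← h, hb]
        by_cases hlt : x.2.2.2 < b
        · simp only [pvWins, hb, hb', if_pos hlt, List.filter_cons, beq_self_eq_true, reduceIte]
          congr 1
          exact ih _ _ (by simp)
        · simp only [pvWins, hb, hb', if_neg hlt, List.filter_cons, beq_self_eq_true, reduceIte]
          exact ih _ _ h
    · have hbeq : (x.2.2.1 == k) = false := by simp [hk]
      have hk' : k ≠ x.2.2.1 := fun hh => hk hh.symm
      rcases hb : best x.2.2.1 with _ | b
      · simp only [pvWins, hb, List.filter_cons, hbeq, Bool.false_eq_true, reduceIte]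
        exact ih _ _ (by simp [hk', h])
      · by_cases hlt : x.2.2.2 < b
        · simp only [pvWins, hb, if_pos hlt, List.filter_cons, hbeq, Bool.false_eq_true, reduceIte]
          exact ih _ _ (by simp [hk', h])
        · simp only [pvWins, hb, if_neg hlt, List.filter_cons, hbeq, Bool.false_eq_true, reduceIte]
          exact ih _ _ h

theorem pv_gw_wins (k : String) : ∀ (l : List pvEn) (best : String → Option Int) (b : Option Int),
    (∀ x ∈ l, x.2.2.1 = k) → best k = b →
    pvGW b (l.map (fun y => (y.1, y.2.1, y.2.2.2))) = (pvWins best l).map (fun y => (y.1, y.2.1, y.2.2.2)) := by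
  intro l
  induction l with
  | nil => intro best b _ _; rfl
  | cons x t ih =>
    intro best b hall hb
    have hx : x.2.2.1 = k := hall x (by simp)
    subst hx
    have hrest : ∀ y ∈ t, y.2.2.1 = x.2.2.1 := fun y hy => hall y (by simp [hy])
    simp only [List.map_cons, pvGW, pvWins, hb]
    cases b with
    | none =>
      simp only [List.map_cons]
      congr 1
      exact ih _ _ hrest (by simp)
    | some bb =>
      by_cases hlt : x.2.2.2 < bb
      · simp only [if_pos hlt, List.map_cons]
        congr 1
        exact ih _ _ hrest (by simp)
      · simp only [if_neg hlt]
        exact ih _ _ hrest hb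

theorem pv_wins_keyset : ∀ (l : List pvEn) (best : String → Option Int) (s : PySem.Set String),
    (∀ e, (best e).isSome → e ∈ s) →
    PySem.Set.update s ((pvWins best l).map (fun y => y.2.2.1)) = PySem.Set.update s (l.map (fun y => y.2.2.1)) := by
  intro l
  induction l with
  | nil => intro best s _; rfl
  | cons x t ih =>
    intro best s h
    have hupd : ∀ (b : Int), ∀ e, ((fun e => if e = x.2.2.1 then some b else best e) e).isSome → e ∈ s.add x.2.2.1 := by
      intro b e he
      by_cases hex : e = x.2.2.1
      · subst hex; rw [PySem.Set.mem_add]; right; rfl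
      · simp only [if_neg hex] at he
        rw [PySem.Set.mem_add]; left; exact h e he
    rcases hb : best x.2.2.1 with _ | b
    · simp only [pvWins, hb, List.map_cons, PySem.Set.update_cons]
      exact ih _ _ (hupd _)
    · by_cases hlt : x.2.2.2 < b
      · simp only [pvWins, hb, if_pos hlt, List.map_cons, PySem.Set.update_cons]
        exact ih _ _ (hupd _)
      · simp only [pvWins, hb, if_neg hlt, List.map_cons, PySem.Set.update_cons]
        have hmem : x.2.2.1 ∈ s := h _ (by rw [hb]; rfl)
        rw [PySem.Set.add_of_mem hmem]
        exact ih _ _ h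

def pvStepA (st : PySem.Dict String Bool × PySem.Dict String (String × Int)) (x : pvEv) :
    PySem.Dict String Bool × PySem.Dict String (String × Int) :=
  match st.2.get? x.2.1 with
  | none => (st.1.insert x.1 true, st.2.insert x.2.1 (x.1, x.2.2))
  | some prev =>
    if x.2.2 < prev.2 then
      ((st.1.insert x.1 true).insert prev.1 true, st.2.insert x.2.1 (x.1, x.2.2))
    else st

def pvBest (opt : PySem.Dict String (String × Int)) : String → Option Int :=
  fun e => (opt.get? e).map (·.2)

theorem pv_lemA : ∀ (l : List pvEn) (sel : PySem.Dict String Bool) (opt : PySem.Dict String (String × Int)),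
    sel.keys.Nodup → (∀ p ∈ opt.items, sel.get? p.2.1 = some true) →
    l.foldl (fun st x => pvStepA st x.2) (sel, opt)
      = ((pvWins (pvBest opt) l).foldl (fun d x => d.insert x.2.1 true) sel,
         (pvWins (pvBest opt) l).foldl (fun d x => d.insert x.2.2.1 (x.2.1, x.2.2.2)) opt) := by
  intro l
  induction l with
  | nil => intro sel opt _ _; rfl
  | cons x t ih =>
    intro sel opt hnd hinv
    have hself : ∀ (v w : String), sel.get? w = some true ∨ w = v → (sel.insert v true).get? w = some true := by
      intro v w hw
      rw [PySem.Dict.get?_insert]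
      by_cases hwv : w = v
      · simp [hwv]
      · rcases hw with hw | hw
        · simp [hwv, hw]
        · exact absurd hw hwv
    have hbest : pvBest (opt.insert x.2.2.1 (x.2.1, x.2.2.2))
        = (fun e => if e = x.2.2.1 then some x.2.2.2 else pvBest opt e) := by
      funext e
      simp only [pvBest, PySem.Dict.get?_insert]
      by_cases he : e = x.2.2.1 <;> simp [he]
    have hinv' : ∀ p ∈ (opt.insert x.2.2.1 (x.2.1, x.2.2.2)).items,
        (sel.insert x.2.1 true).get? p.2.1 = some true := by
      intro p hp
      rw [PySem.Dict.mem_items_insert] at hp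
      rcases hp with hp | ⟨hp, _⟩
      · subst hp; exact hself _ _ (Or.inr rfl)
      · exact hself _ _ (Or.inl (hinv p hp))
    rcases hget : opt.get? x.2.2.1 with _ | prev
    · have hb : pvBest opt x.2.2.1 = none := by simp [pvBest, hget]
      have hstep : pvStepA (sel, opt) x.2 = (sel.insert x.2.1 true, opt.insert x.2.2.1 (x.2.1, x.2.2.2)) := by
        simp [pvStepA, hget]
      simp only [List.foldl_cons, hstep, pvWins, hb]
      rw [ih _ _ (PySem.Dict.nodup_keys_insert _ _ _ hnd) hinv', hbest]
    · have hb : pvBest opt x.2.2.1 = some prev.2 := by simp [pvBest, hget]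
      by_cases hlt : x.2.2.2 < prev.2
      · have hprev : (x.2.2.1, prev) ∈ opt.items := PySem.Dict.mem_items_of_get?_eq_some opt hget
        have hpsel : (sel.insert x.2.1 true).get? prev.1 = some true := hself _ _ (Or.inl (hinv _ hprev))
        have hcollapse : (sel.insert x.2.1 true).insert prev.1 true = sel.insert x.2.1 true :=
          pv_insert_true_self _ _ hpsel (PySem.Dict.nodup_keys_insert _ _ _ hnd)
        have hstep : pvStepA (sel, opt) x.2 = (sel.insert x.2.1 true, opt.insert x.2.2.1 (x.2.1, x.2.2.2)) := by
          simp [pvStepA, hget, hlt, hcollapse]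
        simp only [List.foldl_cons, hstep, pvWins, hb, if_pos hlt]
        rw [ih _ _ (PySem.Dict.nodup_keys_insert _ _ _ hnd) hinv', hbest]
      · have hstep : pvStepA (sel, opt) x.2 = (sel, opt) := by
          simp [pvStepA, hget, hlt]
        simp only [List.foldl_cons, hstep, pvWins, hb, if_neg hlt]
        exact ih _ _ hnd hinv

theorem pv_L2 : ∀ (vs : List String) (d : PySem.Dict String Bool), d.keys.Nodup →
    (∀ p ∈ d.items, p.2 = true) →
    vs.foldl (fun d v => d.insert v true) d
      = vs.foldl (fun d v => if d.contains v then d else d.insert v true) d := by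
  intro vs
  induction vs with
  | nil => intro d _ _; rfl
  | cons v t ih =>
    intro d hnd hall
    simp only [List.foldl_cons]
    by_cases hc : d.contains v = true
    · have hg : ∃ b, d.get? v = some b := by
        have := PySem.Dict.contains_eq_isSome_get? (d := d) (k := v)
        rw [hc] at this
        cases hgv : d.get? v with
        | none => rw [hgv] at this; simp at this
        | some b => exact ⟨b, rfl⟩
      obtain ⟨b, hg⟩ := hg
      have hb : b = true := hall (v, b) (PySem.Dict.mem_items_of_get?_eq_some d hg)
      subst hb
      rw [pv_insert_true_self d v hg hnd, if_pos hc]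
      exact ih d hnd hall
    · rw [if_neg hc]
      have hc' : d.contains v = false := by simpa using hc
      refine ih _ (PySem.Dict.nodup_keys_insert _ _ _ hnd) ?_
      intro p hp
      rw [PySem.Dict.mem_items_insert] at hp
      rcases hp with hp | ⟨hp, _⟩
      · subst hp; rfl
      · exact hall p hp

theorem pv_L1 {ν : Type} (d0 : ν) : ∀ (l : List (String × ν)),
    (l.foldl (fun d p => d.insert p.1 p.2) (PySem.Dict.empty : PySem.Dict String ν)).items
      = (PySem.Set.ofList (l.map (·.1))).map
          (fun k => (k, ((l.filter (fun p => p.1 == k)).map (·.2)).getLastD d0)) := by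
  intro l
  induction l using List.reverseRecOn with
  | nil => rfl
  | append_singleton l x ih =>
    have hkeys : (l.foldl (fun d p => d.insert p.1 p.2) (PySem.Dict.empty : PySem.Dict String ν)).keys
        = PySem.Set.ofList (l.map (·.1)) := by
      rw [PySem.Dict.keys_foldl_insert_key l (fun p => p.1) (fun _ p => p.2), PySem.Dict.keys_empty,
        PySem.Set.update_nil_left]
    rw [List.foldl_append, List.foldl_cons, List.foldl_nil]
    by_cases hx : x.1 ∈ l.map (·.1)
    · have hcon : (l.foldl (fun d p => d.insert p.1 p.2) (PySem.Dict.empty : PySem.Dict String ν)).contains x.1 = true := by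
        rw [PySem.Dict.contains_eq_decide_mem_keys, hkeys]
        simp [PySem.Set.mem_ofList, hx]
      rw [PySem.Dict.items_insert, if_pos hcon, ih, List.map_map]
      have hS : PySem.Set.ofList ((l ++ [x]).map (·.1)) = PySem.Set.ofList (l.map (·.1)) := by
        rw [List.map_append, List.map_cons, List.map_nil, PySem.Set.ofList_append_singleton,
          PySem.Set.add_of_mem ((PySem.Set.mem_ofList _ _).mpr hx)]
      rw [hS]
      apply List.map_congr_left
      intro k hk
      by_cases hkx : k = x.1
      · subst hkx
        simp only [Function.comp, beq_self_eq_true, reduceIte]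
        rw [List.filter_append]
        simp only [List.filter_cons, beq_self_eq_true, reduceIte, List.filter_nil, List.map_append]
        simp
      · have hbeq : (k == x.1) = false := by simp [hkx]
        simp only [Function.comp, hbeq, Bool.false_eq_true, reduceIte]
        rw [List.filter_append]
        have : List.filter (fun p => p.1 == k) [x] = [] := by
          have hxk : (x.1 == k) = false := by
            simp only [beq_eq_false_iff_ne, ne_eq]
            exact fun h => hkx h.symm
          simp [hxk]
        rw [this, List.append_nil]
    · have hcon : (l.foldl (fun d p => d.insert p.1 p.2) (PySem.Dict.empty : PySem.Dict String ν)).contains x.1 = false := by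
        rw [PySem.Dict.contains_eq_decide_mem_keys, hkeys]
        simp [PySem.Set.mem_ofList, hx]
      rw [PySem.Dict.items_insert_of_not_contains _ _ hcon, ih]
      have hS : PySem.Set.ofList ((l ++ [x]).map (·.1))
          = PySem.Set.ofList (l.map (·.1)) ++ [x.1] := by
        rw [List.map_append, List.map_cons, List.map_nil, PySem.Set.ofList_append_singleton,
          PySem.Set.add_of_not_mem (fun hmem => hx ((PySem.Set.mem_ofList _ _).mp hmem))]
      rw [hS, List.map_append]
      congr 1
      · apply List.map_congr_left
        intro k hk
        have hkl : k ∈ l.map (·.1) := (PySem.Set.mem_ofList _ _).mp hk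
        have hkx : k ≠ x.1 := fun h => hx (h ▸ hkl)
        congr 1
        rw [List.filter_append]
        have : List.filter (fun p => p.1 == k) [x] = [] := by
          have hxk : (x.1 == k) = false := by
            simp only [beq_eq_false_iff_ne, ne_eq]
            exact fun h => hkx h.symm
          simp [hxk]
        rw [this, List.append_nil]
      · simp only [List.map_cons, List.map_nil]
        have hfl : List.filter (fun p => p.1 == x.1) l = [] := by
          rw [List.filter_eq_nil_iff]
          intro p hp
          simp only [beq_iff_eq]
          intro hpx
          exact hx (hpx ▸ List.mem_map_of_mem hp)
        rw [List.filter_append, hfl]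
        simp

theorem pv_partition_perm : ∀ (ks : List String) (L : List pvEn), ks.Nodup →
    (∀ x ∈ L, x.2.2.1 ∈ ks) →
    (ks.flatMap (fun k => L.filter (fun y => y.2.2.1 == k))).Perm L := by
  intro ks
  induction ks with
  | nil =>
    intro L _ h
    have : L = [] := by
      cases L with
      | nil => rfl
      | cons x t => exact absurd (h x (by simp)) (by simp)
    simp [this]
  | cons k ks ih =>
    intro L hnd h
    have hknotin : k ∉ ks := (List.nodup_cons.mp hnd).1
    have hnd' : ks.Nodup := (List.nodup_cons.mp hnd).2
    simp only [List.flatMap_cons]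
    have hcong : ∀ k' ∈ ks,
        L.filter (fun y => y.2.2.1 == k')
          = (L.filter (fun y => !(y.2.2.1 == k))).filter (fun y => y.2.2.1 == k') := by
      intro k' hk'
      have hne : k' ≠ k := fun hh => hknotin (hh ▸ hk')
      rw [List.filter_filter]
      apply List.filter_congr
      intro y _
      by_cases hy : y.2.2.1 = k'
      · simp [hy, hne]
      · simp [hy]
    have hfm : ks.flatMap (fun k' => L.filter (fun y => y.2.2.1 == k'))
        = ks.flatMap (fun k' => (L.filter (fun y => !(y.2.2.1 == k))).filter (fun y => y.2.2.1 == k')) :=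
      List.flatMap_congr hcong
    rw [hfm]
    have hperm := ih (L.filter (fun y => !(y.2.2.1 == k))) hnd' (by
      intro x hx
      rw [List.mem_filter] at hx
      have := h x hx.1
      rcases List.mem_cons.mp this with hh | hh
      · exfalso; have := hx.2; rw [hh] at this; simp at this
      · exact hh)
    exact List.Perm.trans (List.Perm.append_left _ hperm) (List.filter_append_perm _ L)

theorem pv_mainB (G : String → List (Int × String × Int)) :
    ∀ (ks : List String) (opt : PySem.Dict String (String × Int)) (ws : List (Int × String)),
    ks.Nodup → (∀ k ∈ ks, opt.contains k = false) → (∀ k ∈ ks, G k ≠ []) →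
    (ks.foldl (fun st k =>
        ((pvGW none (G k)).foldl (fun o x => o.insert k (x.2.1, x.2.2)) st.1,
         st.2 ++ (pvGW none (G k)).map (fun x => (x.1, x.2.1)))) (opt, ws)).1.items
      = opt.items ++ ks.map (fun k => (k, ((pvGW none (G k)).map (fun x => (x.2.1, x.2.2))).getLastD ("", 0)))
    ∧ (ks.foldl (fun st k =>
        ((pvGW none (G k)).foldl (fun o x => o.insert k (x.2.1, x.2.2)) st.1,
         st.2 ++ (pvGW none (G k)).map (fun x => (x.1, x.2.1)))) (opt, ws)).2
      = ws ++ ks.flatMap (fun k => (pvGW none (G k)).map (fun x => (x.1, x.2.1))) := by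
  intro ks
  induction ks with
  | nil => intro opt ws _ _ _; simp
  | cons k ks ih =>
    intro opt ws hnd hfresh hne
    have hgw : pvGW none (G k) ≠ [] := by
      cases hGk : G k with
      | nil => exact absurd hGk (hne k (by simp))
      | cons c cs => simp [pvGW]
    have hfold : (pvGW none (G k)).foldl (fun o x => o.insert k (x.2.1, x.2.2)) opt
        = opt.insert k (((pvGW none (G k)).map (fun x => (x.2.1, x.2.2))).getLastD ("", 0)) :=
      pv_const_key k _ ("", 0) _ opt hgw
    have hkns : k ∉ ks := (List.nodup_cons.mp hnd).1
    have hfresh' : ∀ k' ∈ ks, (opt.insert k (((pvGW none (G k)).map (fun x => (x.2.1, x.2.2))).getLastD ("", 0))).contains k' = false := by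
      intro k' hk'
      rw [PySem.Dict.contains_insert]
      have : (k' == k) = false := by
        simp only [beq_eq_false_iff_ne, ne_eq]
        exact fun h => hkns (h ▸ hk')
      rw [this, Bool.false_or]
      exact hfresh k' (by simp [hk'])
    obtain ⟨ih1, ih2⟩ := ih (opt.insert k (((pvGW none (G k)).map (fun x => (x.2.1, x.2.2))).getLastD ("", 0)))
      (ws ++ (pvGW none (G k)).map (fun x => (x.1, x.2.1)))
      (List.nodup_cons.mp hnd).2 hfresh' (fun k' hk' => hne k' (by simp [hk']))
    constructor
    · simp only [List.foldl_cons, hfold]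
      rw [ih1, PySem.Dict.items_insert_of_not_contains _ _ (hfresh k (by simp))]
      simp [List.append_assoc]
    · simp only [List.foldl_cons, hfold]
      rw [ih2]
      simp [List.append_assoc]

def pvW (order : List (String × List (String × Int))) : List pvEn :=
  pvWins (fun _ => none) (pvEnum 0 (pvFlat order))

def pvKs (order : List (String × List (String × Int))) : PySem.Set String :=
  PySem.Set.ofList ((pvEnum 0 (pvFlat order)).map (fun y => y.2.2.1))

def pvG (order : List (String × List (String × Int))) (k : String) : List (Int × String × Int) :=
  ((pvEnum 0 (pvFlat order)).filter (fun y => y.2.2.1 == k)).map (fun y => (y.1, y.2.1, y.2.2.2))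

theorem pv_A_eq (order : List (String × List (String × Int))) :
    order.foldl (fun st p =>
        p.2.foldl (fun st2 q =>
          match st2.2.get? q.1 with
          | none => (st2.1.insert p.1 true, st2.2.insert q.1 (p.1, q.2))
          | some prev =>
            if q.2 < prev.2 then
              ((st2.1.insert p.1 true).insert prev.1 true, st2.2.insert q.1 (p.1, q.2))
            else st2) st)
      ((PySem.Dict.empty : PySem.Dict String Bool), (PySem.Dict.empty : PySem.Dict String (String × Int)))
    = ((pvW order).foldl (fun d x => d.insert x.2.1 true) PySem.Dict.empty,
       (pvW order).foldl (fun d x => d.insert x.2.2.1 (x.2.1, x.2.2.2)) PySem.Dict.empty) := by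
  have h1 := pv_nested_eq_flat pvStepA order
    ((PySem.Dict.empty : PySem.Dict String Bool), (PySem.Dict.empty : PySem.Dict String (String × Int)))
  have h2 := pv_enum_foldl pvStepA (pvFlat order) 0
    ((PySem.Dict.empty : PySem.Dict String Bool), (PySem.Dict.empty : PySem.Dict String (String × Int)))
  have h3 := pv_lemA (pvEnum 0 (pvFlat order)) PySem.Dict.empty PySem.Dict.empty
    (by rw [PySem.Dict.keys_empty]; exact List.nodup_nil)
    (by intro p hp; simp [PySem.Dict.empty] at hp)
  have hbe : pvBest (PySem.Dict.empty : PySem.Dict String (String × Int)) = (fun _ => none) := by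
    funext e; simp [pvBest, PySem.Dict.get?_empty]
  rw [hbe] at h3
  exact h1.trans (h2.symm.trans h3)

theorem pv_ix_items (order : List (String × List (String × Int))) :
    (order.foldl (fun (st : PySem.Dict String (List (Int × String × Int)) × Int) p =>
        p.2.foldl (fun st2 q =>
          (st2.1.modify q.1 [] (fun l => l ++ [(st2.2, p.1, q.2)]), st2.2 + 1)) st)
      (PySem.Dict.empty, (0 : Int))).1.items
    = (pvKs order).map (fun k => (k, pvG order k)) := by
  have h1 := pv_nested_eq_flat
    (fun (st : PySem.Dict String (List (Int × String × Int)) × Int) (x : pvEv) =>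
      (st.1.modify x.2.1 [] (fun u => u ++ [(st.2, x.1, x.2.2)]), st.2 + 1)) order
    (PySem.Dict.empty, (0 : Int))
  have h2 := pv_ix_bridge (pvFlat order) PySem.Dict.empty 0
  rw [h1, h2]
  set e := pvEnum 0 (pvFlat order) with he
  have hmfold : e.foldl (fun d y => d.modify y.2.2.1 [] (fun u => u ++ [(y.1, y.2.1, y.2.2.2)]))
        (PySem.Dict.empty : PySem.Dict String (List (Int × String × Int)))
      = (e.map (fun y => (y.2.2.1, (y.1, y.2.1, y.2.2.2)))).foldl
          (fun d p => d.modify p.1 [] (fun u => u ++ [p.2])) PySem.Dict.empty := by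
    rw [List.foldl_map]
  have hkeys : (e.foldl (fun d y => d.modify y.2.2.1 [] (fun u => u ++ [(y.1, y.2.1, y.2.2.2)]))
        (PySem.Dict.empty : PySem.Dict String (List (Int × String × Int)))).keys = pvKs order := by
    rw [PySem.Dict.keys_foldl_modify_key e (fun y => y.2.2.1) [] (fun _ y => fun u => u ++ [(y.1, y.2.1, y.2.2.2)]),
      PySem.Dict.keys_empty, PySem.Set.update_nil_left]
    rfl
  have hnd : (e.foldl (fun d y => d.modify y.2.2.1 [] (fun u => u ++ [(y.1, y.2.1, y.2.2.2)]))
        (PySem.Dict.empty : PySem.Dict String (List (Int × String × Int)))).keys.Nodup := by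
    apply PySem.Dict.nodup_keys_foldl_modify_key
    rw [PySem.Dict.keys_empty]; exact List.nodup_nil
  have hgd : ∀ k, (e.foldl (fun d y => d.modify y.2.2.1 [] (fun u => u ++ [(y.1, y.2.1, y.2.2.2)]))
        (PySem.Dict.empty : PySem.Dict String (List (Int × String × Int)))).getD k [] = pvG order k := by
    intro k
    rw [hmfold, PySem.Dict.getD_foldl_modify_append]
    have : List.filter (fun p => p.1 == k) (e.map (fun y => (y.2.2.1, (y.1, y.2.1, y.2.2.2))))
        = (e.filter (fun y => y.2.2.1 == k)).map (fun y => (y.2.2.1, (y.1, y.2.1, y.2.2.2))) := by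
      rw [List.filter_map]
      simp only [Function.comp_def]
    rw [this, List.map_map]
    rfl
  rw [PySem.Dict.items_eq_map_keys _ hnd ([] : List (Int × String × Int)), hkeys]
  apply List.map_congr_left
  intro k _
  rw [hgd k]

theorem pv_gw (order : List (String × List (String × Int))) (k : String) :
    pvGW none (pvG order k)
      = ((pvW order).filter (fun y => y.2.2.1 == k)).map (fun y => (y.1, y.2.1, y.2.2.2)) := by
  have h1 := pv_gw_wins k ((pvEnum 0 (pvFlat order)).filter (fun y => y.2.2.1 == k))
    (fun _ => none) none
    (by intro x hx; rw [List.mem_filter] at hx; exact beq_iff_eq.mp hx.2) rfl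
  have h2 := pv_wins_filter k (pvEnum 0 (pvFlat order)) (fun _ => none) (fun _ => none) rfl
  rw [pvG, h1, ← h2, pvW]

theorem pv_W_mem_ks (order : List (String × List (String × Int))) :
    ∀ x ∈ pvW order, x.2.2.1 ∈ pvKs order := by
  intro x hx
  have hx' : x ∈ pvEnum 0 (pvFlat order) := (pv_wins_sublist _ _).mem hx
  exact (PySem.Set.mem_ofList _ _).mpr (List.mem_map_of_mem hx')

theorem pv_ks_eq_W_keys (order : List (String × List (String × Int))) :
    PySem.Set.ofList ((pvW order).map (fun y => y.2.2.1)) = pvKs order := by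
  have := pv_wins_keyset (pvEnum 0 (pvFlat order)) (fun _ => none) ([] : PySem.Set String)
    (by intro e he; simp at he)
  rw [PySem.Set.update_nil_left, PySem.Set.update_nil_left] at this
  exact this

theorem pv_G_ne_nil (order : List (String × List (String × Int))) :
    ∀ k ∈ pvKs order, pvG order k ≠ [] := by
  intro k hk
  obtain ⟨y, hy, hyk⟩ := List.mem_map.mp ((PySem.Set.mem_ofList _ _).mp hk)
  have : y ∈ (pvEnum 0 (pvFlat order)).filter (fun y => y.2.2.1 == k) :=
    List.mem_filter.mpr ⟨hy, beq_iff_eq.mpr hyk⟩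
  exact fun hnil => by
    have : (y.1, y.2.1, y.2.2.2) ∈ pvG order k := List.mem_map_of_mem this
    rw [hnil] at this
    exact absurd this (List.not_mem_nil)

-- B's main loop, applied
theorem pv_B_main (order : List (String × List (String × Int))) :
    ((pvKs order).foldl (fun st k =>
        ((pvGW none (pvG order k)).foldl (fun o x => o.insert k (x.2.1, x.2.2)) st.1,
         st.2 ++ (pvGW none (pvG order k)).map (fun x => (x.1, x.2.1))))
      ((PySem.Dict.empty : PySem.Dict String (String × Int)), ([] : List (Int × String)))).1.items
      = (pvKs order).map (fun k => (k, ((pvGW none (pvG order k)).map (fun x => (x.2.1, x.2.2))).getLastD ("", 0)))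
    ∧ ((pvKs order).foldl (fun st k =>
        ((pvGW none (pvG order k)).foldl (fun o x => o.insert k (x.2.1, x.2.2)) st.1,
         st.2 ++ (pvGW none (pvG order k)).map (fun x => (x.1, x.2.1))))
      ((PySem.Dict.empty : PySem.Dict String (String × Int)), ([] : List (Int × String)))).2
      = (pvKs order).flatMap (fun k => (pvGW none (pvG order k)).map (fun x => (x.1, x.2.1))) := by
  have h := pv_mainB (pvG order) (pvKs order) PySem.Dict.empty []
    (PySem.Set.nodup_ofList _)
    (fun k _ => PySem.Dict.contains_empty k)
    (pv_G_ne_nil order)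
  constructor
  · rw [h.1]; rfl
  · rw [h.2]; rfl

theorem pv_sorted (order : List (String × List (String × Int))) :
    PySem.List.sorted ((pvKs order).flatMap (fun k => (pvGW none (pvG order k)).map (fun x => (x.1, x.2.1)))) (fun t => t.1)
      = (pvW order).map (fun y => (y.1, y.2.1)) := by
  have hx : (pvKs order).flatMap (fun k => (pvGW none (pvG order k)).map (fun x => (x.1, x.2.1)))
      = ((pvKs order).flatMap (fun k => (pvW order).filter (fun y => y.2.2.1 == k))).map (fun y => (y.1, y.2.1)) := by
    rw [List.map_flatMap]
    apply List.flatMap_congr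
    intro k _
    rw [pv_gw, List.map_map]
    simp only [Function.comp_def]
  have hperm := (pv_partition_perm (pvKs order) (pvW order) (PySem.Set.nodup_ofList _) (pv_W_mem_ks order)).map (fun y : pvEn => (y.1, y.2.1))
  have hpw : ((pvW order).map (fun y => (y.1, y.2.1))).Pairwise (fun a b => a.1 < b.1) := by
    rw [List.pairwise_map]
    exact List.Pairwise.sublist (pv_wins_sublist _ _) (pv_enum_pairwise (pvFlat order) 0)
  rw [hx]
  exact PySem.List.sorted_eq_of_perm_of_pairwise_lt _ _ _ hperm.symm hpw

theorem pv_sel (order : List (String × List (String × Int))) :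
    ((pvW order).foldl (fun d x => d.insert x.2.1 true) (PySem.Dict.empty : PySem.Dict String Bool))
      = (((pvW order).map (fun y => (y.1, y.2.1))).foldl
          (fun (d : PySem.Dict String Bool) t => if d.contains t.2 then d else d.insert t.2 true) PySem.Dict.empty) := by
  have hA : (pvW order).foldl (fun d x => d.insert x.2.1 true) (PySem.Dict.empty : PySem.Dict String Bool)
      = ((pvW order).map (fun y => y.2.1)).foldl (fun d v => d.insert v true) PySem.Dict.empty := by
    rw [List.foldl_map]
  have hB : (((pvW order).map (fun y => (y.1, y.2.1))).foldl
        (fun (d : PySem.Dict String Bool) t => if d.contains t.2 then d else d.insert t.2 true) PySem.Dict.empty)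
      = ((pvW order).map (fun y => y.2.1)).foldl
          (fun d v => if d.contains v then d else d.insert v true) PySem.Dict.empty := by
    rw [List.foldl_map, List.foldl_map]
  rw [hA, hB]
  exact pv_L2 _ _ (by rw [PySem.Dict.keys_empty]; exact List.nodup_nil)
    (by intro p hp; simp [PySem.Dict.empty] at hp)

theorem pv_opt (order : List (String × List (String × Int))) :
    ((pvW order).foldl (fun d x => d.insert x.2.2.1 (x.2.1, x.2.2.2))
        (PySem.Dict.empty : PySem.Dict String (String × Int))).items
      = (pvKs order).map (fun k => (k, ((pvGW none (pvG order k)).map (fun x => (x.2.1, x.2.2))).getLastD ("", 0))) := by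
  have hA : (pvW order).foldl (fun d x => d.insert x.2.2.1 (x.2.1, x.2.2.2))
        (PySem.Dict.empty : PySem.Dict String (String × Int))
      = ((pvW order).map (fun x => (x.2.2.1, (x.2.1, x.2.2.2)))).foldl
          (fun d p => d.insert p.1 p.2) PySem.Dict.empty := by
    rw [List.foldl_map]
  rw [hA, pv_L1 (("", 0) : String × Int), List.map_map]
  have hkeys : PySem.Set.ofList ((pvW order).map ((fun p : String × String × Int => p.1) ∘ (fun x : pvEn => (x.2.2.1, (x.2.1, x.2.2.2)))))
      = pvKs order := by
    simp only [Function.comp_def]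
    exact pv_ks_eq_W_keys order
  rw [hkeys]
  apply List.map_congr_left
  intro k _
  congr 1
  rw [pv_gw, List.map_map, List.filter_map, List.map_map]
  simp only [Function.comp_def]

theorem pv_final (order : List (String × List (String × Int))) :
    (let st := order.foldl (fun st p =>
        p.2.foldl (fun st2 q =>
          match st2.2.get? q.1 with
          | none => (st2.1.insert p.1 true, st2.2.insert q.1 (p.1, q.2))
          | some prev =>
            if q.2 < prev.2 then
              ((st2.1.insert p.1 true).insert prev.1 true, st2.2.insert q.1 (p.1, q.2))
            else st2) st)
      ((PySem.Dict.empty : PySem.Dict String Bool), (PySem.Dict.empty : PySem.Dict String (String × Int)))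
     (st.1.items, st.2.items))
    = (let ix := order.foldl (fun (st : PySem.Dict String (List (Int × String × Int)) × Int) p =>
          p.2.foldl (fun st2 q =>
            (st2.1.modify q.1 [] (fun l => l ++ [(st2.2, p.1, q.2)]), st2.2 + 1)) st)
        (PySem.Dict.empty, (0 : Int))
       let st := ix.1.items.foldl (fun (st : PySem.Dict String (String × Int) × List (Int × String)) gi =>
          let r := gi.2.foldl (fun (st2 : PySem.Dict String (String × Int) × List (Int × String) × Option Int) t =>
              match st2.2.2 with
              | none => (st2.1.insert gi.1 (t.2.1, t.2.2), st2.2.1 ++ [(t.1, t.2.1)], some t.2.2)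
              | some b =>
                if t.2.2 < b then (st2.1.insert gi.1 (t.2.1, t.2.2), st2.2.1 ++ [(t.1, t.2.1)], some t.2.2)
                else st2) (st.1, st.2, none)
          (r.1, r.2.1))
        ((PySem.Dict.empty : PySem.Dict String (String × Int)), ([] : List (Int × String)))
       let win_events := PySem.List.sorted st.2 (fun t => t.1)
       let sel := win_events.foldl (fun (d : PySem.Dict String Bool) t =>
          if d.contains t.2 then d else d.insert t.2 true) PySem.Dict.empty
       (sel.items, st.1.items)) := by
  -- B's main loop, after the index is rewritten to per-enchantment groups
  have hfold2 : (((pvKs order).map (fun k => (k, pvG order k))).foldl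
      (fun (st : PySem.Dict String (String × Int) × List (Int × String)) gi =>
          let r := gi.2.foldl (fun (st2 : PySem.Dict String (String × Int) × List (Int × String) × Option Int) t =>
              match st2.2.2 with
              | none => (st2.1.insert gi.1 (t.2.1, t.2.2), st2.2.1 ++ [(t.1, t.2.1)], some t.2.2)
              | some b =>
                if t.2.2 < b then (st2.1.insert gi.1 (t.2.1, t.2.2), st2.2.1 ++ [(t.1, t.2.1)], some t.2.2)
                else st2) (st.1, st.2, none)
          (r.1, r.2.1))
      ((PySem.Dict.empty : PySem.Dict String (String × Int)), ([] : List (Int × String))))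
      = ((pvKs order).foldl (fun st k =>
          ((pvGW none (pvG order k)).foldl (fun o x => o.insert k (x.2.1, x.2.2)) st.1,
           st.2 ++ (pvGW none (pvG order k)).map (fun x => (x.1, x.2.1))))
        ((PySem.Dict.empty : PySem.Dict String (String × Int)), ([] : List (Int × String)))) := by
    rw [List.foldl_map]
    congr 1
    funext st k
    show (let r := (pvG order k).foldl (fun (st2 : PySem.Dict String (String × Int) × List (Int × String) × Option Int) t =>
              match st2.2.2 with
              | none => (st2.1.insert k (t.2.1, t.2.2), st2.2.1 ++ [(t.1, t.2.1)], some t.2.2)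
              | some bb =>
                if t.2.2 < bb then (st2.1.insert k (t.2.1, t.2.2), st2.2.1 ++ [(t.1, t.2.1)], some t.2.2)
                else st2) (st.1, st.2, none)
          (r.1, r.2.1))
        = ((pvGW none (pvG order k)).foldl (fun o x => o.insert k (x.2.1, x.2.2)) st.1,
           st.2 ++ (pvGW none (pvG order k)).map (fun x => (x.1, x.2.1)))
    rw [pv_gfold]
  show ((order.foldl (fun st p =>
        p.2.foldl (fun st2 q =>
          match st2.2.get? q.1 with
          | none => (st2.1.insert p.1 true, st2.2.insert q.1 (p.1, q.2))
          | some prev =>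
            if q.2 < prev.2 then
              ((st2.1.insert p.1 true).insert prev.1 true, st2.2.insert q.1 (p.1, q.2))
            else st2) st)
      ((PySem.Dict.empty : PySem.Dict String Bool), (PySem.Dict.empty : PySem.Dict String (String × Int)))).1.items,
     (order.foldl (fun st p =>
        p.2.foldl (fun st2 q =>
          match st2.2.get? q.1 with
          | none => (st2.1.insert p.1 true, st2.2.insert q.1 (p.1, q.2))
          | some prev =>
            if q.2 < prev.2 then
              ((st2.1.insert p.1 true).insert prev.1 true, st2.2.insert q.1 (p.1, q.2))
            else st2) st)
      ((PySem.Dict.empty : PySem.Dict String Bool), (PySem.Dict.empty : PySem.Dict String (String × Int)))).2.items) = _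
  rw [pv_A_eq]
  show _ = (((PySem.List.sorted (((order.foldl (fun (st : PySem.Dict String (List (Int × String × Int)) × Int) p =>
          p.2.foldl (fun st2 q =>
            (st2.1.modify q.1 [] (fun l => l ++ [(st2.2, p.1, q.2)]), st2.2 + 1)) st)
        (PySem.Dict.empty, (0 : Int))).1.items.foldl (fun (st : PySem.Dict String (String × Int) × List (Int × String)) gi =>
          let r := gi.2.foldl (fun (st2 : PySem.Dict String (String × Int) × List (Int × String) × Option Int) t =>
              match st2.2.2 with
              | none => (st2.1.insert gi.1 (t.2.1, t.2.2), st2.2.1 ++ [(t.1, t.2.1)], some t.2.2)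
              | some b =>
                if t.2.2 < b then (st2.1.insert gi.1 (t.2.1, t.2.2), st2.2.1 ++ [(t.1, t.2.1)], some t.2.2)
                else st2) (st.1, st.2, none)
          (r.1, r.2.1))
        ((PySem.Dict.empty : PySem.Dict String (String × Int)), ([] : List (Int × String)))).2) (fun t => t.1)).foldl
        (fun (d : PySem.Dict String Bool) t =>
          if d.contains t.2 then d else d.insert t.2 true) PySem.Dict.empty).items,
      ((order.foldl (fun (st : PySem.Dict String (List (Int × String × Int)) × Int) p =>
          p.2.foldl (fun st2 q =>
            (st2.1.modify q.1 [] (fun l => l ++ [(st2.2, p.1, q.2)]), st2.2 + 1)) st)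
        (PySem.Dict.empty, (0 : Int))).1.items.foldl (fun (st : PySem.Dict String (String × Int) × List (Int × String)) gi =>
          let r := gi.2.foldl (fun (st2 : PySem.Dict String (String × Int) × List (Int × String) × Option Int) t =>
              match st2.2.2 with
              | none => (st2.1.insert gi.1 (t.2.1, t.2.2), st2.2.1 ++ [(t.1, t.2.1)], some t.2.2)
              | some b =>
                if t.2.2 < b then (st2.1.insert gi.1 (t.2.1, t.2.2), st2.2.1 ++ [(t.1, t.2.1)], some t.2.2)
                else st2) (st.1, st.2, none)
          (r.1, r.2.1))
        ((PySem.Dict.empty : PySem.Dict String (String × Int)), ([] : List (Int × String)))).1.items)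
  rw [pv_ix_items, hfold2]
  have hmain := pv_B_main order
  refine Prod.ext ?_ ?_
  · show ((pvW order).foldl (fun d x => d.insert x.2.1 true) PySem.Dict.empty).items = _
    rw [pv_sel]
    show _ = ((PySem.List.sorted (((pvKs order).foldl (fun st k =>
          ((pvGW none (pvG order k)).foldl (fun o x => o.insert k (x.2.1, x.2.2)) st.1,
           st.2 ++ (pvGW none (pvG order k)).map (fun x => (x.1, x.2.1))))
        ((PySem.Dict.empty : PySem.Dict String (String × Int)), ([] : List (Int × String)))).2) (fun t => t.1)).foldl
        (fun (d : PySem.Dict String Bool) t => if d.contains t.2 then d else d.insert t.2 true) PySem.Dict.empty).items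
    rw [hmain.2, pv_sorted]
  · show ((pvW order).foldl (fun d x => d.insert x.2.2.1 (x.2.1, x.2.2.2)) PySem.Dict.empty).items = _
    rw [pv_opt, ← hmain.1]

-- ===== VERDICT (by name: the statement is the Claim_ definition above) =====
theorem optimize_villagers_spec : Claim_equal_optimize_villagers := by
  intro ve ec ct _
  unfold Spec_optimize_villagers optimize_villagers optimize_villagers_alt
  exact pv_final _
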